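-- pv_equiv track=rewrite | github.com/vishalpmittal/practice-fun | funNLearn/src/main/java/dsAlgo/leetcode/P10xx/P1003_CheckIfWordIsValidAfterSubstitutions.py | isValid_0
-- ===== SOURCE A (Python) =====
-- def isValid_0(S: str) -> bool:
--     stack = []
--     for i in S:
--         if i == 'c':
--             if stack[-2:] != ['a', 'b']:
--                 return False
--             stack.pop()
--             stack.pop()
--         else:
--             stack.append(i)
--     return not stack
-- ===== SOURCE B (Python) =====
-- def isValid_0(S: str) -> bool:
--     while 'abc' in S:
--         S = S.replace('abc', '')
--     return S == ''
-- ===== Notes on version B (the rewrite author's own statement) =====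
-- stated objective: simpler
-- what changed: Replaces A's one-pass stack machine with a fixed-point reduction that repeatedly deletes all occurrences of the three-character pattern and then tests emptiness.
import Mathlib
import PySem

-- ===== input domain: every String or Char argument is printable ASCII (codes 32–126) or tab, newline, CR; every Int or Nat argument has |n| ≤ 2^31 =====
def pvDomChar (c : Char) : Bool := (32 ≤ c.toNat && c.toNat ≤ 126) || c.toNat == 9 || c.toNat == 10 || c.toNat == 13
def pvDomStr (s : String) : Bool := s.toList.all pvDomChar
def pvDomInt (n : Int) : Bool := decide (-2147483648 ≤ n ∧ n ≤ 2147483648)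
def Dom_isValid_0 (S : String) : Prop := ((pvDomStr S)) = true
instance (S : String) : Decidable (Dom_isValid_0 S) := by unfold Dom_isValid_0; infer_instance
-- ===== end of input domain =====

-- B replaces A's one-pass stack machine by a fixed-point loop that repeatedly deletes all occurrences of the
-- three-character pattern and tests emptiness; objective: simpler (return-value equivalence proved on Dom).


-- ===== PORT A =====
-- body of A's for-loop: state none = 'return False' already taken
def pvStep (q : Option (List Char)) (i : Char) : Option (List Char) :=
  match q with
  | none => none
  | some stack =>
    if i = 'c' then
      if PySem.List.slice stack (some (-2)) none ≠ ['a', 'b'] then none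
      else some stack.dropLast.dropLast           -- stack.pop(); stack.pop()
    else some (stack ++ [i])

def isValid_0 (S : String) : Bool :=
  match S.toList.foldl pvStep (some []) with
  | none => false                                  -- the early 'return False'
  | some stack => stack.isEmpty                    -- 'return not stack'

-- ===== PORT B =====
-- strict decrease of 'S = S.replace("abc", "")' while 'abc' in S (used for termination)
theorem pvGoLenLe (new : List Char) (hn : new = []) :
    ∀ (fuel : Nat) (l acc : List Char),
      (PySem.Chars.replace.go ['a','b','c'] new fuel l acc).length ≤ acc.length + l.length := by
  intro fuel
  induction fuel with
  | zero => intro l acc; simp [PySem.Chars.replace.go]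
  | succ fuel ih =>
    intro l acc
    match l with
    | [] => simp [PySem.Chars.replace.go]
    | c :: t =>
      rw [PySem.Chars.replace.go]
      by_cases hp : List.isPrefixOf ['a','b','c'] (c :: t) = true
      · rw [if_pos hp]
        subst hn
        have hle := ih (List.drop (['a','b','c'].length) (c :: t)) (List.reverse [] ++ acc)
        have hdl : (List.drop ['a','b','c'].length (c :: t)).length = (c :: t).length - 3 := by
          simp [List.length_drop]
        simp only [List.reverse_nil, List.nil_append] at hle ⊢
        omega
      · rw [if_neg hp]
        have := ih t (c :: acc)
        simp only [List.length_cons] at this ⊢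
        omega

theorem pvGoLenLt (new : List Char) (hn : new = []) :
    ∀ (fuel : Nat) (l acc : List Char), ['a','b','c'] <:+: l → l.length ≤ fuel →
      (PySem.Chars.replace.go ['a','b','c'] new fuel l acc).length < acc.length + l.length := by
  intro fuel
  induction fuel with
  | zero =>
    intro l acc hinf hlen
    interval_cases hl0 : l.length
    · rw [List.length_eq_zero_iff] at hl0; subst hl0
      simp at hinf
  | succ fuel ih =>
    intro l acc hinf hlen
    match l with
    | [] => simp at hinf
    | c :: t =>
      rw [PySem.Chars.replace.go]
      by_cases hp : List.isPrefixOf ['a','b','c'] (c :: t) = true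
      · rw [if_pos hp]
        subst hn
        have hle := pvGoLenLe [] rfl fuel (List.drop ['a','b','c'].length (c :: t)) (List.reverse [] ++ acc)
        have hpre : ['a','b','c'] <+: (c :: t) := List.isPrefixOf_iff_prefix.mp hp
        have h3 : 3 ≤ (c :: t).length := hpre.length_le
        have hdl : (List.drop ['a','b','c'].length (c :: t)).length = (c :: t).length - 3 := by
          simp [List.length_drop]
        simp only [List.reverse_nil, List.nil_append] at hle ⊢
        omega
      · rw [if_neg hp]
        have hinf' : ['a','b','c'] <:+: t := by
          rcases List.infix_cons_iff.mp hinf with h | h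
          · exact absurd (List.isPrefixOf_iff_prefix.mpr h) hp
          · exact h
        have := ih t (c :: acc) hinf' (by simpa using Nat.le_of_succ_le_succ hlen)
        simp only [List.length_cons] at this ⊢
        omega

theorem pvReplaceLenLt (l : List Char) (h : PySem.Chars.isIn ['a','b','c'] l = true) :
    (PySem.Chars.replace l ['a','b','c'] []).length < l.length := by
  have hinf : ['a','b','c'] <:+: l := (PySem.Chars.isIn_iff_infix _ _).mp h
  unfold PySem.Chars.replace
  simp only [List.isEmpty_iff]
  rw [if_neg (by simp)]
  have := pvGoLenLt [] rfl l.length l [] hinf le_rfl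
  simpa using this

-- the while-loop of B, on the character list (Source B works on the string itself)
def pvAltLoop (l : List Char) : Bool :=
  if h : PySem.Chars.isIn ['a','b','c'] l = true then
    pvAltLoop (PySem.Chars.replace l ['a','b','c'] [])       -- S = S.replace('abc', '')
  else
    l.isEmpty                                                 -- return S == ''
termination_by l.length
decreasing_by exact pvReplaceLenLt l h

def isValid_0_alt (S : String) : Bool := pvAltLoop S.toList

-- ===== PRECONDITION & SPEC =====
def Spec_isValid_0 (S : String) (out : Bool) : Prop := out = isValid_0_alt S
instance (S : String) (out : Bool) : Decidable (Spec_isValid_0 S out) := by unfold Spec_isValid_0; infer_instance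

-- ===== CLAIM (what is proved, stated in full; the proofs are below) =====
def Claim_equal_isValid_0 : Prop := ∀ (S : String), Dom_isValid_0 S → Spec_isValid_0 S (isValid_0 S)

-- ===== LEMMAS AND PROOFS =====

theorem pvFoldlStepNone (l : List Char) : l.foldl pvStep none = none := by
  induction l with
  | nil => rfl
  | cons c t ih => simpa [pvStep] using ih

-- feeding one 'abc' block to the stack machine is a no-op
theorem pvRunAbc (q : Option (List Char)) (l : List Char) :
    List.foldl pvStep q ('a' :: 'b' :: 'c' :: l) = List.foldl pvStep q l := by
  match q with
  | none => rw [pvFoldlStepNone, pvFoldlStepNone]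
  | some st =>
    have h1 : pvStep (some st) 'a' = some (st ++ ['a']) := by simp [pvStep]
    have h2 : pvStep (some (st ++ ['a'])) 'b' = some (st ++ ['a', 'b']) := by simp [pvStep]
    have hsl : PySem.List.slice (st ++ ['a','b']) (some (-2)) none = ['a','b'] := by
      rw [PySem.List.slice_from_neg_ofNat (st ++ ['a','b']) 2 (by omega)]
      simp
    have h3 : pvStep (some (st ++ ['a','b'])) 'c' = some st := by
      simp only [pvStep, hsl]
      have : (st ++ ['a','b']).dropLast.dropLast = st := by
        have : st ++ ['a','b'] = (st ++ ['a']) ++ ['b'] := by simp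
        rw [this, List.dropLast_concat, List.dropLast_concat]
      simp [this]
    simp only [List.foldl_cons, h1, h2, h3]


-- running the machine over replace.go's output = running it over the unconsumed input
theorem pvGoRun :
    ∀ (fuel : Nat) (l acc : List Char) (q : Option (List Char)),
      List.foldl pvStep q (PySem.Chars.replace.go ['a','b','c'] [] fuel l acc) =
      List.foldl pvStep q (acc.reverse ++ l) := by
  intro fuel
  induction fuel with
  | zero => intro l acc q; simp [PySem.Chars.replace.go]
  | succ fuel ih =>
    intro l acc q
    match l with
    | [] => simp [PySem.Chars.replace.go]
    | c :: t =>
      rw [PySem.Chars.replace.go]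
      by_cases hp : List.isPrefixOf ['a','b','c'] (c :: t) = true
      · rw [if_pos hp]
        simp only [List.reverse_nil, List.nil_append]
        rcases (List.isPrefixOf_iff_prefix.mp hp) with ⟨t', ht⟩
        have hc : c :: t = 'a' :: 'b' :: 'c' :: t' := by simpa using ht.symm
        have hd : List.drop ['a','b','c'].length (c :: t) = t' := by rw [hc]; simp
        rw [hd, ih t' acc q, hc, List.foldl_append, List.foldl_append, pvRunAbc]
      · rw [if_neg hp, ih t (c :: acc) q]
        simp

theorem pvRunReplace (l : List Char) (q : Option (List Char)) :
    List.foldl pvStep q (PySem.Chars.replace l ['a','b','c'] []) = List.foldl pvStep q l := by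
  unfold PySem.Chars.replace
  rw [if_neg (by simp)]
  simpa using pvGoRun l.length l [] q

-- strings reducible to ε by deleting 'abc' blocks
inductive PvRed : List Char → Prop
  | nil : PvRed []
  | ins (u v : List Char) : PvRed (u ++ v) → PvRed (u ++ ['a','b','c'] ++ v)

theorem pvRedCases {l : List Char} (h : PvRed l) : l = [] ∨ ['a','b','c'] <:+: l := by
  cases h with
  | nil => exact Or.inl rfl
  | ins u v _ => exact Or.inr ⟨u, v, by simp⟩

-- if the machine accepts from stack st on input l, then st ++ l reduces to ε
theorem pvAcceptRed : ∀ (l st : List Char),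
    List.foldl pvStep (some st) l = some [] → PvRed (st ++ l) := by
  intro l
  induction l with
  | nil =>
    intro st h
    simp only [List.foldl_nil, Option.some.injEq] at h
    subst h; simpa using PvRed.nil
  | cons c t ih =>
    intro st h
    rw [List.foldl_cons] at h
    by_cases hc : c = 'c'
    · subst hc
      by_cases hs : PySem.List.slice st (some (-2)) none = ['a','b']
      · rw [PySem.List.slice_from_neg_ofNat st 2 (by omega)] at hs
        have hst : st = st.take (st.length - 2) ++ ['a','b'] := by
          conv_lhs => rw [← List.take_append_drop (st.length - 2) st]
          rw [hs]
        have hstep : pvStep (some st) 'c' = some (st.take (st.length - 2)) := by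
          have hsl : PySem.List.slice st (some (-2)) none = ['a','b'] := by
            rw [PySem.List.slice_from_neg_ofNat st 2 (by omega)]; exact hs
          simp only [pvStep, hsl]
          have : st.dropLast.dropLast = st.take (st.length - 2) := by
            conv_lhs => rw [hst]
            have : st.take (st.length - 2) ++ ['a','b'] = (st.take (st.length - 2) ++ ['a']) ++ ['b'] := by simp
            rw [this, List.dropLast_concat, List.dropLast_concat]
          simp [this]
        rw [hstep] at h
        have hred := ih _ h
        have := PvRed.ins (st.take (st.length - 2)) t hred
        have harr : st.take (st.length - 2) ++ ['a','b','c'] ++ t = st ++ 'c' :: t := by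
          conv_rhs => rw [hst]
          simp
        rwa [harr] at this
      · have hstep : pvStep (some st) 'c' = none := by
          simp [pvStep, hs]
        rw [hstep, pvFoldlStepNone] at h
        exact absurd h (by simp)
    · have hstep : pvStep (some st) c = some (st ++ [c]) := by simp [pvStep, hc]
      rw [hstep] at h
      have := ih _ h
      simpa using this

theorem pvNoAbcAccept {l : List Char} (h : PySem.Chars.isIn ['a','b','c'] l = false) :
    (List.foldl pvStep (some []) l = some []) ↔ l = [] := by
  constructor
  · intro hacc
    have hred := pvAcceptRed l [] (by simpa using hacc)
    rcases pvRedCases (by simpa using hred) with h0 | hinf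
    · exact h0
    · exact absurd ((PySem.Chars.isIn_iff_infix _ _).mpr hinf) (by simp [h])
  · intro h0; subst h0; rfl

-- the main induction: A's machine answer = B's fixed-point loop answer
theorem pvMain : ∀ (n : Nat) (l : List Char), l.length ≤ n →
    (match List.foldl pvStep (some []) l with
     | none => false
     | some stack => stack.isEmpty) = pvAltLoop l := by
  intro n
  induction n with
  | zero =>
    intro l hl
    have h0 : l = [] := by simpa using List.length_eq_zero_iff.mp (Nat.le_zero.mp hl)
    subst h0
    rw [pvAltLoop]
    simp [PySem.Chars.isIn_iff_infix]
  | succ n ih =>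
    intro l hl
    rw [pvAltLoop]
    by_cases hin : PySem.Chars.isIn ['a','b','c'] l = true
    · rw [dif_pos hin, ← ih _ (by have := pvReplaceLenLt l hin; omega), pvRunReplace]
    · rw [dif_neg hin]
      by_cases hacc : List.foldl pvStep (some []) l = some []
      · have h0 := (pvNoAbcAccept (by simpa using hin)).mp hacc
        rw [hacc]
        subst h0; simp
      · match hr : List.foldl pvStep (some []) l with
        | none =>
          have hne : l ≠ [] := by
            intro h0; subst h0; simp at hr
          simp [hne]
        | some st =>
          have hst : st ≠ [] := by
            intro h0; subst h0; exact hacc hr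
          have hne : l ≠ [] := by
            intro h0; subst h0
            simp only [List.foldl_nil, Option.some.injEq] at hr
            exact hst hr.symm
          simp only []
          rw [List.isEmpty_eq_false_iff.mpr hst, List.isEmpty_eq_false_iff.mpr hne]

-- ===== VERDICT (by name: the statement is the Claim_ definition above) =====
theorem isValid_0_spec : Claim_equal_isValid_0 := by
  intro S _
  unfold Spec_isValid_0 isValid_0 isValid_0_alt
  exact pvMain S.toList.length S.toList le_rfl
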